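-- pv_equiv track=rewrite | github.com/Aasthaengg/IBMdataset | Python_codes/p03352/s113824370.py | actual
-- ===== SOURCE A (Python) =====
-- def actual(X):
--     pow_nums = [1]
--
--     for i in range(2, 40 + 1):
--         for j in range(2, 40 + 1):
--             if i ** j <= 1000:
--                 pow_nums.append(i ** j)
--
--     pow_nums = sorted(set(pow_nums))
--
--     return [pow_num for pow_num in pow_nums if pow_num <= X][-1]
-- ===== SOURCE B (Python) =====
-- def actual(X):
--     # Downward search: test each candidate n <= min(X, 1000) for being a
--     # perfect power (1, or a**b with a,b >= 2) and return the first hit.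
--     def is_pp(n):
--         if n == 1:
--             return True
--         a = 2
--         while a * a <= n:
--             p = a * a
--             while p <= n:
--                 if p == n:
--                     return True
--                 p *= a
--             a += 1
--         return False
--
--     n = min(X, 1000)
--     while n >= 1:
--         if is_pp(n):
--             return n
--         n -= 1
-- ===== Notes on version B (the rewrite author's own statement) =====
-- stated objective: alternative
-- what changed: Replaces A's build-all-powers/sort/filter-last table construction by a downward search from min(X,1000) with a per-candidate perfect-power test.
import Mathlib
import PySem

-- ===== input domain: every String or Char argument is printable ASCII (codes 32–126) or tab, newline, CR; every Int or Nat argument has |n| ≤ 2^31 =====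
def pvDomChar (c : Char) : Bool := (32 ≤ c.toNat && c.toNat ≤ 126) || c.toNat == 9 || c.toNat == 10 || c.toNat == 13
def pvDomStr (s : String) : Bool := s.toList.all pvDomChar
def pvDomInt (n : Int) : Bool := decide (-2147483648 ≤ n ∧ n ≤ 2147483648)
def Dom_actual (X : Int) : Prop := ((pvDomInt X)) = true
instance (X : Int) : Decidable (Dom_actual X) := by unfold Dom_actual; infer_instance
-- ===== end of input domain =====

-- B replaces A's build-all-powers/sort/filter table by a bounded downward
-- search with a per-candidate perfect-power test (alternative decomposition).

-- ===== PORT A =====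
-- i ** j with j from range(2, 41) (so j ≥ 0): ported as i ^ j.toNat (exact here)
def actual (X : Int) : Int :=
  let pow_nums : List Int := [1]
  let pow_nums := (PySem.List.pyRange 2 41 1).foldl (fun acc i =>
      (PySem.List.pyRange 2 41 1).foldl (fun acc j =>
        if i ^ j.toNat ≤ 1000 then acc ++ [i ^ j.toNat] else acc) acc) pow_nums
  let pow_nums := PySem.List.sorted (PySem.Set.ofList pow_nums) (fun x => x) false
  (PySem.List.pyGet? (pow_nums.filter (fun p => decide (p ≤ X))) (-1)).getD 0
  -- the final [-1] raises IndexError iff the filtered list is empty (X < 1); Pre_ excludes that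

-- ===== PORT B =====
-- inner 'while p <= n' loop of is_pp; fuel 11 suffices since p doubles at least and n ≤ 1000
def ppInner (fuel : Nat) (a p n : Int) : Bool :=
  match fuel with
  | 0 => false
  | f+1 => if p ≤ n then (p == n || ppInner f a (p * a) n) else false

-- outer 'while a * a <= n' loop of is_pp; fuel 40 suffices since a ≤ 31 when a*a ≤ 1000
def ppOuter (fuel : Nat) (a n : Int) : Bool :=
  match fuel with
  | 0 => false
  | f+1 => if a * a ≤ n then (ppInner 11 a (a * a) n || ppOuter f (a + 1) n) else false

def isPP (n : Int) : Bool := n == 1 || ppOuter 40 2 n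

-- the 'while n >= 1' downward loop; fuel 1001 suffices since n starts ≤ 1000.
-- When the loop exhausts (X < 1, outside Pre_) Python B returns None; the port returns 0 there.
def altLoop (fuel : Nat) (n : Int) : Int :=
  match fuel with
  | 0 => 0
  | f+1 => if 1 ≤ n then (if isPP n then n else altLoop f (n - 1)) else 0

def actual_alt (X : Int) : Int := altLoop 1001 (min X 1000)

-- ===== PRECONDITION & SPEC =====
-- Pre_ excludes exactly X < 1, where A's final [-1] raises IndexError (empty filtered list).
def Pre_actual (X : Int) : Prop := 1 ≤ X
instance (X : Int) : Decidable (Pre_actual X) := by unfold Pre_actual; infer_instance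
def pvWitness_actual : Int := 7

def Spec_actual (X : Int) (out : Int) : Prop := out = actual_alt X
instance (X : Int) (out : Int) : Decidable (Spec_actual X out) := by unfold Spec_actual; infer_instance

-- ===== CLAIM (what is proved, stated in full; the proofs are below) =====
def Claim_equal_actual : Prop := ∀ (X : Int), Dom_actual X → Pre_actual X → Spec_actual X (actual X)

-- ===== LEMMAS AND PROOFS =====

-- the sorted deduplicated table A builds, as a literal
def pvL : List Int :=
  [1, 4, 8, 9, 16, 25, 27, 32, 36, 49, 64, 81, 100, 121, 125, 128, 144, 169,
   196, 216, 225, 243, 256, 289, 324, 343, 361, 400, 441, 484, 512, 529, 576,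
   625, 676, 729, 784, 841, 900, 961, 1000]

def gA (X : Int) : Int :=
  (PySem.List.pyGet? (pvL.filter (fun p => decide (p ≤ X))) (-1)).getD 0

set_option maxRecDepth 100000 in
theorem actual_eq_gA (X : Int) : actual X = gA X := rfl

set_option maxRecDepth 100000 in
set_option maxHeartbeats 4000000 in
theorem isPP_mem : ∀ n : Nat, n < 1000 →
    isPP ((n : Int) + 1) = decide (((n : Int) + 1) ∈ pvL) := by decide

theorem pvL_le_1000 : ∀ a ∈ pvL, a ≤ 1000 := by decide

theorem pvL_sorted : pvL.Pairwise (fun a b => a < b) := by decide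

theorem last_filter_mem (n : Int) :
    ∀ (L : List Int), L.Pairwise (fun a b => a < b) → n ∈ L →
      (L.filter (fun p => decide (p ≤ n))).getLast? = some n := by
  intro L
  induction L with
  | nil => intro _ h; cases h
  | cons x xs ih =>
    intro hpw hmem
    have hpw' := (List.pairwise_cons.mp hpw).2
    have hx := (List.pairwise_cons.mp hpw).1
    by_cases hxs : n ∈ xs
    · have hne : xs.filter (fun p => decide (p ≤ n)) ≠ [] := by
        intro hnil
        have : n ∈ xs.filter (fun p => decide (p ≤ n)) :=
          List.mem_filter.mpr ⟨hxs, by simp⟩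
        rw [hnil] at this; cases this
      rw [List.filter_cons]
      split
      · rcases hcons : xs.filter (fun p => decide (p ≤ n)) with _ | ⟨y, ys⟩
        · exact absurd hcons hne
        · rw [List.getLast?_cons_cons, ← hcons]
          exact ih hpw' hxs
      · exact ih hpw' hxs
    · have hxn : x = n := by
        cases hmem with
        | head => rfl
        | tail _ h => exact absurd h hxs
      subst hxn
      have hnilxs : xs.filter (fun p => decide (p ≤ x)) = [] := by
        apply List.filter_eq_nil_iff.mpr
        intro a ha
        have := hx a ha
        simp; omega
      rw [List.filter_cons, if_pos (by simp), hnilxs]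
      rfl

theorem filter_not_mem (n : Int) (hn : n ∉ pvL) :
    pvL.filter (fun p => decide (p ≤ n)) = pvL.filter (fun p => decide (p ≤ n - 1)) := by
  apply List.filter_congr
  intro p hp
  have hne : p ≠ n := fun h => hn (h ▸ hp)
  simp only [decide_eq_decide]
  omega

theorem gA_mem (n : Int) (hn : n ∈ pvL) : gA n = n := by
  unfold gA
  rw [PySem.List.pyGet?_neg_one, last_filter_mem n pvL pvL_sorted hn]
  rfl

theorem gA_not_mem (n : Int) (hn : n ∉ pvL) : gA n = gA (n - 1) := by
  unfold gA
  rw [filter_not_mem n hn]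

theorem altLoop_fuel (m : Nat) : ∀ (f₁ f₂ : Nat) (n : Int), n.toNat = m →
    m ≤ f₁ → m ≤ f₂ → altLoop f₁ n = altLoop f₂ n := by
  induction m with
  | zero =>
    intro f₁ f₂ n h _ _
    have hn : ¬ (1 ≤ n) := by omega
    cases f₁ <;> cases f₂ <;> simp [altLoop, hn]
  | succ k ih =>
    intro f₁ f₂ n h h1 h2
    obtain ⟨a, rfl⟩ : ∃ a, f₁ = a + 1 := ⟨f₁ - 1, by omega⟩
    obtain ⟨b, rfl⟩ : ∃ b, f₂ = b + 1 := ⟨f₂ - 1, by omega⟩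
    have hn : 1 ≤ n := by omega
    simp only [altLoop, if_pos hn]
    by_cases hp : isPP n
    · simp [hp]
    · simp only [Bool.not_eq_true] at hp
      simp only [hp]
      exact ih a b (n - 1) (by omega) (by omega) (by omega)

theorem gA_eq_altLoop : ∀ k : Nat, k < 1000 →
    gA ((k : Int) + 1) = altLoop (k + 1) ((k : Int) + 1) := by
  intro k
  induction k with
  | zero => intro _; decide
  | succ j ih =>
    intro hk
    have hcast : ((j + 1 : Nat) : Int) + 1 = ((j : Int) + 1) + 1 := by push_cast; ring_nf
    rw [hcast]
    have hmemeq : isPP (((j : Int) + 1) + 1) = decide ((((j : Int) + 1) + 1) ∈ pvL) := by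
      have := isPP_mem (j + 1) hk
      push_cast at this ⊢
      convert this using 2
    simp only [altLoop, if_pos (by omega : (1 : Int) ≤ ((j : Int) + 1) + 1)]
    by_cases hp : (((j : Int) + 1) + 1) ∈ pvL
    · rw [hmemeq, if_pos (by simpa using hp)]
      exact gA_mem _ hp
    · rw [hmemeq, if_neg (by simpa using hp)]
      rw [gA_not_mem _ hp]
      have : ((j : Int) + 1) + 1 - 1 = (j : Int) + 1 := by ring
      rw [this]
      exact ih (by omega)

-- ===== VERDICT (by name: the statement is the Claim_ definition above) =====
theorem actual_spec : Claim_equal_actual := by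
  intro X hdom hpre
  unfold Spec_actual
  rw [actual_eq_gA]
  by_cases hx : X ≤ 1000
  · have hpre' : (1 : Int) ≤ X := hpre
    obtain ⟨k, hk, hklt⟩ : ∃ k : Nat, X = (k : Int) + 1 ∧ k < 1000 :=
      ⟨(X - 1).toNat, by omega, by omega⟩
    subst hk
    rw [gA_eq_altLoop k hklt]
    unfold actual_alt
    rw [min_eq_left (by omega)]
    exact (altLoop_fuel (k + 1) (k + 1) 1001 ((k : Int) + 1) (by omega) (by omega) (by omega))
  · have hfilter : pvL.filter (fun p => decide (p ≤ X)) = pvL := by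
      apply List.filter_eq_self.mpr
      intro a ha
      have := pvL_le_1000 a ha
      simp; omega
    have hmin : min X 1000 = 1000 := by omega
    unfold gA actual_alt
    rw [hfilter, hmin]
    decide
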